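-- pv_equiv track=rewrite | github.com/rebel-youngin/remu | tests/scripts/smmu_decode.py | report_walk
-- ===== SOURCE A (Python) =====
-- PTE_OUTPUT_M = ((1 << 48) - 1) & ~0xFFF  # bits[47:12]; ignore upper-bits
--
-- def report_walk(ipa, walk_log, granule_bits=12):
--     """Pretty-print a walk_log from walk(). Computes the final PA at
--     the end if the walk produced a page/block."""
--     out = ["Walk IPA=0x%x  (granule=%u-bit)" % (ipa, granule_bits)]
--     final_pa = None
--     for entry in walk_log:
--         lvl, table_pa, idx, pte_pa, pte, decoded, kind = entry
--         out.append("  L%d  table=0x%016x  idx=%4u  pte_pa=0x%016x"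
--                    % (lvl, table_pa, idx, pte_pa))
--         for line in decoded.splitlines():
--             out.append("    " + line)
--         if kind in ("page", "block"):
--             output_pa = pte & PTE_OUTPUT_M
--             offset_in_page = ipa & ((1 << granule_bits) - 1)
--             final_pa = output_pa | offset_in_page
--         if kind == "invalid":
--             out.append("    (walk halted: invalid PTE)")
--     if final_pa is not None:
--         out.append("Final PA = 0x%016x" % final_pa)
--     else:
--         out.append("Final PA = (none, walk did not reach a leaf)")
--     return "\n".join(out)
-- ===== SOURCE B (Python) =====
-- PTE_OUTPUT_M = ((1 << 48) - 1) & ~0xFFF  # bits[47:12]; ignore upper-bits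
--
-- def report_walk(ipa, walk_log, granule_bits=12):
--     """Pretty-print a walk_log. Builds the text lines in one loop and
--     computes the final PA in a separate reverse scan for the last leaf."""
--     lines = ["Walk IPA=0x%x  (granule=%u-bit)" % (ipa, granule_bits)]
--     for lvl, table_pa, idx, pte_pa, pte, decoded, kind in walk_log:
--         lines.append("  L%d  table=0x%016x  idx=%4u  pte_pa=0x%016x"
--                      % (lvl, table_pa, idx, pte_pa))
--         lines.extend("    " + line for line in decoded.splitlines())
--         if kind == "invalid":
--             lines.append("    (walk halted: invalid PTE)")
--     leaf = next((e for e in reversed(walk_log) if e[6] in ("page", "block")), None)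
--     if leaf is None:
--         lines.append("Final PA = (none, walk did not reach a leaf)")
--     else:
--         final_pa = (leaf[4] & PTE_OUTPUT_M) | (ipa & ((1 << granule_bits) - 1))
--         lines.append("Final PA = 0x%016x" % final_pa)
--     return "\n".join(lines)
-- ===== Notes on version B (the rewrite author's own statement) =====
-- stated objective: simpler
-- what changed: The loop now builds only the text lines; the final PA is computed afterwards by a separate reverse scan for the last page/block entry instead of an accumulator threaded through the loop.
import Mathlib
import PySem

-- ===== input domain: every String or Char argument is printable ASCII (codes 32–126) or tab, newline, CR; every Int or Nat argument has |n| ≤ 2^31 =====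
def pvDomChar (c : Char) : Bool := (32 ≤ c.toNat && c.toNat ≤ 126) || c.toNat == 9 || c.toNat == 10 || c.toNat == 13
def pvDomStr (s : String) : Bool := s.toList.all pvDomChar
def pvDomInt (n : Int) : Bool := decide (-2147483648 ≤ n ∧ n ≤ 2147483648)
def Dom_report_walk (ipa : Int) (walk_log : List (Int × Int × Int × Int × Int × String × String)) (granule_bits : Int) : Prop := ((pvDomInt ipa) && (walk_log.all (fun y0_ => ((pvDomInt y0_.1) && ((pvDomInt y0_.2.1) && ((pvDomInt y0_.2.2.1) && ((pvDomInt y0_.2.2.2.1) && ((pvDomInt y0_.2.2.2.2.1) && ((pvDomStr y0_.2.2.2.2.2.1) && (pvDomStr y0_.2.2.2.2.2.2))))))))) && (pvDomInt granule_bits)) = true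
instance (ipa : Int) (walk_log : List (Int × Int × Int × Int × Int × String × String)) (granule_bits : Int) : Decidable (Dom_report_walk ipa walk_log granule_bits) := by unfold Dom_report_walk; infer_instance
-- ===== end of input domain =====

-- B builds only the text lines in its loop and finds the final PA by a separate
-- reverse scan for the last page/block entry (objective: simpler decomposition;
-- same cost). Equivalence of the RETURN value on Pre_ (where Python A returns).

-- ===== PORT A =====
-- shared formatting helpers (both Pythons emit byte-identical text via the same % formats)
-- "%x": lowercase hex, '-' in front for negatives (exact for Python's %-formatting of ints)
def pvHex (n : Int) : List Char :=
  if n < 0 then '-' :: Nat.toDigits 16 n.natAbs else Nat.toDigits 16 n.toNat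
-- "%016x": zero-pad to width 16, sign before the zeros (exact)
def pvHex16 (n : Int) : List Char :=
  if n < 0 then
    let d := Nat.toDigits 16 n.natAbs
    '-' :: (List.replicate (15 - d.length) '0' ++ d)
  else
    let d := Nat.toDigits 16 n.toNat
    List.replicate (16 - d.length) '0' ++ d
-- "%4u": right-justify str(n) with spaces to width 4 (exact)
def pvPad4 (n : Int) : List Char :=
  let s := PySem.Int.toChars n
  List.replicate (4 - s.length) ' ' ++ s
def pvHeader (ipa granule_bits : Int) : String :=
  String.ofList ("Walk IPA=0x".toList ++ pvHex ipa ++ "  (granule=".toList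
    ++ PySem.Int.toChars granule_bits ++ "-bit)".toList)
def pvLevelLine (lvl table_pa idx pte_pa : Int) : String :=
  String.ofList ("  L".toList ++ PySem.Int.toChars lvl ++ "  table=0x".toList ++ pvHex16 table_pa
    ++ "  idx=".toList ++ pvPad4 idx ++ "  pte_pa=0x".toList ++ pvHex16 pte_pa)
def pvIndent (l : String) : String := String.ofList ("    ".toList ++ l.toList)
-- PTE_OUTPUT_M = ((1 << 48) - 1) & ~0xFFF
def pvMask : Int := PySem.Int.band ((1 <<< 48) - 1) (Int.not 0xFFF)
-- (pte & PTE_OUTPUT_M) | (ipa & ((1 << granule_bits) - 1)); the shift uses .toNat,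
-- Python raises for negative granule_bits — excluded by Pre_
def pvFinalPa (ipa granule_bits pte : Int) : Int :=
  PySem.Int.bor (PySem.Int.band pte pvMask) (PySem.Int.band ipa ((1 <<< granule_bits.toNat) - 1))
def pvFinalLine (pa : Int) : String := String.ofList ("Final PA = 0x".toList ++ pvHex16 pa)
def pvNoneLine : String := "Final PA = (none, walk did not reach a leaf)"
def pvHaltLine : String := "    (walk halted: invalid PTE)"
def pvIsLeaf (kind : String) : Bool := kind == "page" || kind == "block"

-- A's loop body: state is (out, final_pa)
def reportA_step (ipa granule_bits : Int) (st : List String × Option Int)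
    (e : Int × Int × Int × Int × Int × String × String) : List String × Option Int :=
  let out1 := st.1 ++ [pvLevelLine e.1 e.2.1 e.2.2.1 e.2.2.2.1]
    ++ (PySem.Str.splitlines e.2.2.2.2.2.1).map pvIndent
  let fp := if pvIsLeaf e.2.2.2.2.2.2 then some (pvFinalPa ipa granule_bits e.2.2.2.2.1) else st.2
  let out2 := if e.2.2.2.2.2.2 == "invalid" then out1 ++ [pvHaltLine] else out1
  (out2, fp)

def report_walk (ipa : Int) (walk_log : List (Int × Int × Int × Int × Int × String × String)) (granule_bits : Int) : String :=
  let st := walk_log.foldl (reportA_step ipa granule_bits) ([pvHeader ipa granule_bits], none)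
  PySem.Str.join "\n" (st.1 ++ [match st.2 with | some pa => pvFinalLine pa | none => pvNoneLine])

-- ===== PORT B =====
-- B's loop body: only the lines accumulator
def reportB_step (acc : List String) (e : Int × Int × Int × Int × Int × String × String) : List String :=
  acc ++ [pvLevelLine e.1 e.2.1 e.2.2.1 e.2.2.2.1]
    ++ (PySem.Str.splitlines e.2.2.2.2.2.1).map pvIndent
    ++ (if e.2.2.2.2.2.2 == "invalid" then [pvHaltLine] else [])

def report_walk_alt (ipa : Int) (walk_log : List (Int × Int × Int × Int × Int × String × String)) (granule_bits : Int) : String :=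
  let lines := walk_log.foldl reportB_step [pvHeader ipa granule_bits]
  let fin := match walk_log.reverse.find? (fun e => pvIsLeaf e.2.2.2.2.2.2) with
    | some e => pvFinalLine (pvFinalPa ipa granule_bits e.2.2.2.2.1)
    | none => pvNoneLine
  PySem.Str.join "\n" (lines ++ [fin])

-- ===== PRECONDITION & SPEC =====
-- Pre_ excludes only inputs where Python A raises (ValueError: `1 << granule_bits`
-- with negative granule_bits, evaluated only when some entry's kind is page/block).
def Pre_report_walk (ipa : Int) (walk_log : List (Int × Int × Int × Int × Int × String × String)) (granule_bits : Int) : Prop :=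
  (∃ e ∈ walk_log, pvIsLeaf e.2.2.2.2.2.2 = true) → 0 ≤ granule_bits
instance (ipa : Int) (walk_log : List (Int × Int × Int × Int × Int × String × String)) (granule_bits : Int) : Decidable (Pre_report_walk ipa walk_log granule_bits) := by unfold Pre_report_walk; infer_instance
def pvWitness_report_walk : Int × (List (Int × Int × Int × Int × Int × String × String)) × Int :=
  (4097, [(0, 4096, 1, 4104, 65536, "AF=1", "page")], 12)

def Spec_report_walk (ipa : Int) (walk_log : List (Int × Int × Int × Int × Int × String × String)) (granule_bits : Int) (out : String) : Prop := out = report_walk_alt ipa walk_log granule_bits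
instance (ipa : Int) (walk_log : List (Int × Int × Int × Int × Int × String × String)) (granule_bits : Int) (out : String) : Decidable (Spec_report_walk ipa walk_log granule_bits out) := by unfold Spec_report_walk; infer_instance

-- ===== CLAIM (what is proved, stated in full; the proofs are below) =====
def Claim_equal_report_walk : Prop := ∀ (ipa : Int) (walk_log : List (Int × Int × Int × Int × Int × String × String)) (granule_bits : Int), Dom_report_walk ipa walk_log granule_bits → Pre_report_walk ipa walk_log granule_bits → Spec_report_walk ipa walk_log granule_bits (report_walk ipa walk_log granule_bits)

-- ===== LEMMAS AND PROOFS =====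

-- the lines component of A's fold ignores the final_pa component and equals B's fold
theorem pv_lines_eq (ipa granule_bits : Int)
    (l : List (Int × Int × Int × Int × Int × String × String))
    (out0 : List String) (fp0 : Option Int) :
    (l.foldl (reportA_step ipa granule_bits) (out0, fp0)).1 = l.foldl reportB_step out0 := by
  induction l generalizing out0 fp0 with
  | nil => rfl
  | cons x xs ih =>
    simp only [List.foldl_cons]
    rw [show reportA_step ipa granule_bits (out0, fp0) x
        = ((reportA_step ipa granule_bits (out0, fp0) x).1,
           (reportA_step ipa granule_bits (out0, fp0) x).2) from rfl]
    rw [ih]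
    congr 1
    simp only [reportA_step, reportB_step]
    split <;> simp

-- the final_pa component of A's fold is the last leaf, i.e. the first leaf of the reverse
theorem pv_fp_eq (ipa granule_bits : Int)
    (l : List (Int × Int × Int × Int × Int × String × String))
    (st : List String × Option Int) :
    (l.foldl (reportA_step ipa granule_bits) st).2 =
      ((l.reverse.find? (fun e => pvIsLeaf e.2.2.2.2.2.2)).map
        (fun e => pvFinalPa ipa granule_bits e.2.2.2.2.1)).or st.2 := by
  induction l generalizing st with
  | nil => rfl
  | cons x xs ih =>
    simp only [List.foldl_cons, List.reverse_cons, List.find?_append]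
    rw [ih]
    cases h : xs.reverse.find? (fun e => pvIsLeaf e.2.2.2.2.2.2) with
    | some e => simp
    | none =>
      simp only [Option.map_none, Option.or, List.find?_singleton]
      simp only [reportA_step]
      cases pvIsLeaf x.2.2.2.2.2.2 <;> simp

-- ===== VERDICT (by name: the statement is the Claim_ definition above) =====
theorem report_walk_spec : Claim_equal_report_walk := by
  unfold Claim_equal_report_walk
  intro ipa walk_log granule_bits _ _
  unfold Spec_report_walk report_walk report_walk_alt
  simp only [pv_lines_eq, pv_fp_eq, Option.or]
  congr 1
  cases walk_log.reverse.find? (fun e => pvIsLeaf e.2.2.2.2.2.2) <;> rfl
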